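-- pv_equiv track=rewrite | github.com/stenskjaer/lemmatizer | greekindex.py | find_lemmas
-- ===== SOURCE A (Python) =====
-- def recursive_string_find(pattern, string, start=0):
--     """Recursive search function.
--
--     Returns list of indices of `pattern` in `string`.
--     """
--     pos = string.find(pattern, start)
--     if pos == -1:
--         # Not found!
--         return []
--
--     # No need for else statement
--     return [pos] + recursive_string_find(pattern, string, pos + len(pattern))
--
-- def find_lemmas(token, lemma_string):
--     """Find all the possible lemma suggestions to one token. Input the
--     need and haystack, the token that needs to be parsed, and the list
--     of lemmas.
--
--     Returns a list of possible lemmas.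
--     """
--
--     result_list = []
--     token = ' ' + token.strip() + ' '
--     lemma_list = recursive_string_find(token, lemma_string)
--     for item in lemma_list:
--         previous_linebreak = lemma_string.rfind('\n', item-5000, item)
--         match = lemma_string[previous_linebreak:previous_linebreak+40].split(' ')[0]
--         result_list.append(match.strip())
--
--     return(result_list)
-- ===== SOURCE B (Python) =====
-- def find_lemmas(token, lemma_string):
--     """Find all the possible lemma suggestions to one token.
--
--     Single iterative pass: scan for the next occurrence with str.find and
--     extract the lemma at the head of its line immediately, instead of first
--     building the full index list recursively and then looping over it.
--     """
--     needle = ' ' + token.strip() + ' '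
--     results = []
--     start = 0
--     while True:
--         pos = lemma_string.find(needle, start)
--         if pos == -1:
--             break
--         previous_linebreak = lemma_string.rfind('\n', pos - 5000, pos)
--         match = lemma_string[previous_linebreak:previous_linebreak + 40].split(' ')[0]
--         results.append(match.strip())
--         start = pos + len(needle)
--     return results
-- ===== Notes on version B (the rewrite author's own statement) =====
-- stated objective: simpler
-- what changed: Replaces the recursive index-collector plus a second extraction loop with one iterative while-loop that finds each occurrence and extracts its lemma in the same pass (no intermediate index list, no recursion).
import Mathlib
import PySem

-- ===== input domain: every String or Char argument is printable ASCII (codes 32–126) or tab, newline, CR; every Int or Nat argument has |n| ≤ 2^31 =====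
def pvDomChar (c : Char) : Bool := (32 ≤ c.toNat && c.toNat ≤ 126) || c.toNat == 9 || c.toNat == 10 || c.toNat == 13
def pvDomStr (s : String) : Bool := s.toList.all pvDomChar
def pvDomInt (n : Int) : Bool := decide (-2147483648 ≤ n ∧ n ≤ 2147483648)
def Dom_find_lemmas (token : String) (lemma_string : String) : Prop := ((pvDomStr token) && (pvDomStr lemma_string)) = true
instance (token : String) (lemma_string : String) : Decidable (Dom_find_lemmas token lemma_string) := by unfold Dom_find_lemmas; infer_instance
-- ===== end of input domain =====

-- B replaces A's recursive index-collector + second extraction loop with one iterative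
-- fused scan (objective: simpler — no intermediate index list, no recursion).

-- ===== PORT A =====
-- recursive_string_find, with a fuel totality guard (the pattern find_lemmas passes has
-- length ≥ 2, so fuel = len(string)+1 always suffices; the fuel never runs out there).
def recursive_string_find (pattern : String) (strng : String) (start : Int) (fuel : Nat) : List Int :=
  match fuel with
  | 0 => []
  | Nat.succ fuel =>
    let pos := PySem.Str.findFrom strng pattern start
    if pos = -1 then []
    else pos :: recursive_string_find pattern strng (pos + (PySem.Str.len pattern : Int)) fuel

def find_lemmas (token : String) (lemma_string : String) : List String :=
  let token' := PySem.Str.join "" [" ", PySem.Str.strip token, " "]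
  let lemma_list := recursive_string_find token' lemma_string 0 ((PySem.Str.len lemma_string).toNat + 1)
  lemma_list.foldl (fun result_list item =>
    let previous_linebreak := PySem.Str.rfindFrom lemma_string "\n" (item - 5000) (some item)
    -- lemma_string[pb:pb+40].split(' ')[0]; the split list is never empty, [0] is .headD
    let m := ((PySem.Str.split? (PySem.Str.slice lemma_string (some previous_linebreak) (some (previous_linebreak + 40))) " ").getD []).headD ""
    result_list ++ [PySem.Str.strip m]) []

-- ===== PORT B =====
-- B's while-loop: find the next occurrence and extract its lemma in the same step.
def pvFindLoop (needle : String) (lemma_string : String) (start : Int) (acc : List String) (fuel : Nat) : List String :=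
  match fuel with
  | 0 => acc
  | Nat.succ fuel =>
    let pos := PySem.Str.findFrom lemma_string needle start
    if pos = -1 then acc
    else
      let pb := PySem.Str.rfindFrom lemma_string "\n" (pos - 5000) (some pos)
      let m := ((PySem.Str.split? (PySem.Str.slice lemma_string (some pb) (some (pb + 40))) " ").getD []).headD ""
      pvFindLoop needle lemma_string (pos + (PySem.Str.len needle : Int)) (acc ++ [PySem.Str.strip m]) fuel

def find_lemmas_alt (token : String) (lemma_string : String) : List String :=
  let needle := PySem.Str.join "" [" ", PySem.Str.strip token, " "]
  pvFindLoop needle lemma_string 0 [] ((PySem.Str.len lemma_string).toNat + 1)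

-- ===== PRECONDITION & SPEC =====
def Spec_find_lemmas (token : String) (lemma_string : String) (out : List String) : Prop := out = find_lemmas_alt token lemma_string
instance (token : String) (lemma_string : String) (out : List String) : Decidable (Spec_find_lemmas token lemma_string out) := by unfold Spec_find_lemmas; infer_instance

-- ===== CLAIM (what is proved, stated in full; the proofs are below) =====
def Claim_equal_find_lemmas : Prop := ∀ (token : String) (lemma_string : String), Dom_find_lemmas token lemma_string → Spec_find_lemmas token lemma_string (find_lemmas token lemma_string)

-- ===== LEMMAS AND PROOFS =====

-- the per-occurrence extraction both loops perform
def pvExtract (lemma_string : String) (item : Int) : String :=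
  let pb := PySem.Str.rfindFrom lemma_string "\n" (item - 5000) (some item)
  PySem.Str.strip (((PySem.Str.split? (PySem.Str.slice lemma_string (some pb) (some (pb + 40))) " ").getD []).headD "")

theorem pvFindLoop_eq_map (needle lemma_string : String) :
    ∀ (fuel : Nat) (start : Int) (acc : List String),
      pvFindLoop needle lemma_string start acc fuel
        = acc ++ (recursive_string_find needle lemma_string start fuel).map (pvExtract lemma_string) := by
  intro fuel
  induction fuel with
  | zero => intro start acc; simp [pvFindLoop, recursive_string_find]
  | succ fuel ih =>
    intro start acc
    simp only [pvFindLoop, recursive_string_find, PySem.Str.findFrom_eq]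
    by_cases h : PySem.Chars.findFrom lemma_string.toList needle.toList start = -1
    · simp [h]
    · simp [h, ih, pvExtract]

theorem find_lemmas_spec : Claim_equal_find_lemmas := by
  intro token lemma_string _
  unfold Spec_find_lemmas find_lemmas find_lemmas_alt
  rw [pvFindLoop_eq_map]
  simpa [pvExtract] using
    PySem.List.foldl_append_singleton_eq_map
      (l := recursive_string_find (PySem.Str.join "" [" ", PySem.Str.strip token, " "]) lemma_string 0 ((PySem.Str.len lemma_string).toNat + 1))
      (f := pvExtract lemma_string) (acc := [])
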